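-- pv_equiv track=rewrite | github.com/allenkang92/my-coding-challenges | python/pg/pg_181854.py | solution
-- ===== SOURCE A (Python) =====
-- def solution(arr, n):
--     answer = []
--     if len(arr) % 2 == 0:       # 배열 길이가 짝수일 때
--         for i in range(len(arr)):
--             if i % 2 != 0:       # 홀수 인덱스에 n을 더함
--                 answer.append(arr[i] + n)
--             else:
--                 answer.append(arr[i])
--     else:                        # 배열 길이가 홀수일 때
--         for i in range(len(arr)):
--             if i % 2 == 0:       # 짝수 인덱스에 n을 더함
--                 answer.append(arr[i] + n)
--             else:
--                 answer.append(arr[i])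
--     return answer
-- ===== SOURCE B (Python) =====
-- def solution(arr, n):
--     answer = list(arr)
--     start = 1 if len(arr) % 2 == 0 else 0
--     for i in range(start, len(arr), 2):
--         answer[i] += n
--     return answer
-- ===== Notes on version B (the rewrite author's own statement) =====
-- stated objective: simpler
-- what changed: B copies the array once and strides in place over only the affected positions via range(start, len(arr), 2), instead of rebuilding the list element-by-element with a per-index parity branch inside two mirrored loops.
import Mathlib
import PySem

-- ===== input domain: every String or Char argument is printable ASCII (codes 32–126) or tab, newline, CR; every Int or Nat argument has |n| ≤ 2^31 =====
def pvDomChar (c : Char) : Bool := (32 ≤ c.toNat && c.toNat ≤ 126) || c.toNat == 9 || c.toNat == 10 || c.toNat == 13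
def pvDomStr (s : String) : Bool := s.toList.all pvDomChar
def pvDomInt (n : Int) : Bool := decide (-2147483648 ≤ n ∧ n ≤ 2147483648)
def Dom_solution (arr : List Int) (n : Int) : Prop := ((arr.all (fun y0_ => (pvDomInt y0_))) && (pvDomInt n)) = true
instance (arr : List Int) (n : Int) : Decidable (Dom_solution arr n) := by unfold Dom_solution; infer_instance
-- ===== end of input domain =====

-- B copies the array once and strides in place over only the affected positions
-- (range(start, len, 2)) instead of rebuilding the list with a parity branch in two
-- mirrored loops; same O(n) cost, simpler decomposition.


-- ===== PORT A =====
def solution (arr : List Int) (n : Int) : List Int :=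
  if PySem.Int.mod (arr.length : Int) 2 == 0 then
    (PySem.List.pyRange 0 (arr.length : Int) 1).foldl
      (fun answer i =>
        if PySem.Int.mod i 2 != 0 then answer ++ [PySem.List.pyGetD arr i 0 + n]
        else answer ++ [PySem.List.pyGetD arr i 0]) []
  else
    (PySem.List.pyRange 0 (arr.length : Int) 1).foldl
      (fun answer i =>
        if PySem.Int.mod i 2 == 0 then answer ++ [PySem.List.pyGetD arr i 0 + n]
        else answer ++ [PySem.List.pyGetD arr i 0]) []

-- ===== PORT B =====
def solution_alt (arr : List Int) (n : Int) : List Int :=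
  let start : Int := if PySem.Int.mod (arr.length : Int) 2 == 0 then 1 else 0
  (PySem.List.pyRange start (arr.length : Int) 2).foldl
    (fun answer i => PySem.List.pySetD answer i (PySem.List.pyGetD answer i 0 + n)) arr

-- ===== PRECONDITION & SPEC =====
def Spec_solution (arr : List Int) (n : Int) (out : List Int) : Prop := out = solution_alt arr n
instance (arr : List Int) (n : Int) (out : List Int) : Decidable (Spec_solution arr n out) := by unfold Spec_solution; infer_instance

-- ===== CLAIM (what is proved, stated in full; the proofs are below) =====
def Claim_equal_solution : Prop := ∀ (arr : List Int) (n : Int), Dom_solution arr n → Spec_solution arr n (solution arr n)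

-- ===== LEMMAS AND PROOFS =====

-- the B-side fold preserves length
theorem bumpFold_length (n : Int) (L : List Int) (xs : List Int) :
    (L.foldl (fun answer i => PySem.List.pySetD answer i (PySem.List.pyGetD answer i 0 + n)) xs).length
      = xs.length := by
  induction L generalizing xs with
  | nil => rfl
  | cons i L ih => simp [List.foldl_cons, ih, PySem.List.length_pySetD]

-- the B-side fold bumps exactly the positions listed (distinct, in range) by n
theorem bumpFold_getD (n : Int) (L : List Int) (xs : List Int)
    (hnd : L.Nodup) (hmem : ∀ i ∈ L, 0 ≤ i ∧ i < (xs.length : Int)) (j : Nat) :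
    (L.foldl (fun answer i => PySem.List.pySetD answer i (PySem.List.pyGetD answer i 0 + n)) xs).getD j 0
      = if (j : Int) ∈ L then xs.getD j 0 + n else xs.getD j 0 := by
  induction L generalizing xs with
  | nil => simp
  | cons i L ih =>
    obtain ⟨hi0, hilt⟩ := hmem i (List.mem_cons_self)
    have hiN : i = ((i.toNat : Nat) : Int) := by omega
    have hiNlt : i.toNat < xs.length := by omega
    rw [List.foldl_cons]
    have hv : PySem.List.pyGetD xs i 0 = xs.getD i.toNat 0 := by
      rw [PySem.List.pyGetD_eq_getElem xs 0 hi0 (by simpa using hilt),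
        List.getD_eq_getElem _ _ hiNlt]
    have hset : PySem.List.pySetD xs i (PySem.List.pyGetD xs i 0 + n)
        = xs.set i.toNat (xs.getD i.toNat 0 + n) := by
      rw [PySem.List.pySetD_of_nonneg xs _ hi0, hv]
    rw [hset]
    have hlen : (xs.set i.toNat (xs.getD i.toNat 0 + n)).length = xs.length := by simp
    rw [ih (xs.set i.toNat (xs.getD i.toNat 0 + n)) hnd.of_cons
        (by intro k hk; have := hmem k (List.mem_cons_of_mem _ hk); omega)]
    have hgetset : ∀ m : Nat, m ≠ i.toNat →
        (xs.set i.toNat (xs.getD i.toNat 0 + n)).getD m 0 = xs.getD m 0 := by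
      intro m hm
      rcases Nat.lt_or_ge m xs.length with h | h
      · rw [List.getD_eq_getElem _ _ (by simpa using h), List.getD_eq_getElem _ _ h,
          List.getElem_set_ne (by omega)]
      · rw [List.getD_eq_default _ _ (by simpa using h), List.getD_eq_default _ _ h]
    by_cases hj : (j : Int) ∈ L
    · have hji : (j : Int) ≠ i := by
        intro h; exact (hnd.notMem (by rwa [h] at hj)).elim
      simp only [if_pos, List.mem_cons, hj, or_true, if_pos]
      rw [hgetset j (by omega)]
    · simp only [hj, if_neg, not_false_iff, List.mem_cons]
      by_cases hji : (j : Int) = i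
      · have hjN : j = i.toNat := by omega
        subst hjN
        simp only [hji, true_or, if_pos]
        rw [List.getD_eq_getElem _ _ (by simpa using hiNlt), List.getElem_set_self,
          List.getD_eq_getElem _ _ hiNlt]
      · simp only [hji, or_self, if_neg, not_false_iff]
        exact hgetset j (by omega)

-- membership in the B-side stride range, as arithmetic on a Nat index
theorem mem_stride (start : Int) (len : Nat) (j : Nat) :
    ((j : Int) ∈ PySem.List.pyRange start (len : Int) 2
      ↔ start ≤ (j : Int) ∧ j < len ∧ (2 : Int) ∣ (j : Int) - start) := by
  rw [PySem.List.mem_pyRange_iff_of_pos (by norm_num)]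
  omega

theorem nodup_stride (start b : Int) : (PySem.List.pyRange start b 2).Nodup := by
  rw [PySem.List.pyRange_of_pos _ _ (by norm_num : (0:Int) < 2)]
  exact List.Nodup.map (fun a c h => by omega) List.nodup_range

theorem mem_stride_bounds (start b : Int) (hs : 0 ≤ start) :
    ∀ i ∈ PySem.List.pyRange start b 2, 0 ≤ i ∧ i < b := by
  intro i hi
  rw [PySem.List.mem_pyRange_iff_of_pos (by norm_num)] at hi
  omega

-- A's fold, with the branch pushed inside the append, is a map over the index range
theorem aFold_eq_map (arr : List Int) (n : Int) (c : Int → Bool) :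
    (PySem.List.pyRange 0 (arr.length : Int) 1).foldl
      (fun answer i =>
        if c i then answer ++ [PySem.List.pyGetD arr i 0 + n]
        else answer ++ [PySem.List.pyGetD arr i 0]) []
    = (List.range arr.length).map
        (fun (k : Nat) => if c (k : Int) then arr.getD k 0 + n else arr.getD k 0) := by
  have hfun : (fun (answer : List Int) (i : Int) =>
      if c i then answer ++ [PySem.List.pyGetD arr i 0 + n]
      else answer ++ [PySem.List.pyGetD arr i 0])
      = fun answer i => answer ++ [if c i then PySem.List.pyGetD arr i 0 + n
                                   else PySem.List.pyGetD arr i 0] := by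
    funext answer i; split <;> rfl
  rw [hfun, PySem.List.foldl_append_singleton_eq_map, List.nil_append,
    PySem.List.pyRange_one, List.map_map]
  have hlen : (((arr.length : Int)) - 0).toNat = arr.length := by omega
  rw [hlen]
  apply List.map_congr_left
  intro k _
  simp [PySem.List.pyGetD_natCast]

-- ===== VERDICT (by name: the statement is the Claim_ definition above) =====
theorem solution_spec : Claim_equal_solution := by
  intro arr n _
  unfold Spec_solution solution solution_alt
  have h2 : ∀ i : Int, PySem.Int.mod i 2 = i % 2 :=
    fun i => PySem.Int.mod_eq_emod_of_pos (by norm_num)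
  set start : Int := if PySem.Int.mod (arr.length : Int) 2 == 0 then 1 else 0 with hstart
  have hs0 : 0 ≤ start := by rw [hstart]; split <;> norm_num
  have hb := fun j => bumpFold_getD n (PySem.List.pyRange start (arr.length : Int) 2) arr
    (nodup_stride _ _) (mem_stride_bounds _ _ hs0) j
  have hblen := bumpFold_length n (PySem.List.pyRange start (arr.length : Int) 2) arr
  by_cases hpar : PySem.Int.mod (arr.length : Int) 2 == 0
  · simp only [hpar, if_pos]
    rw [aFold_eq_map arr n (fun i => PySem.Int.mod i 2 != 0)]
    apply List.ext_getElem (by simp [hblen])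
    intro j hj1 hj2
    simp only [List.length_map, List.length_range] at hj1
    rw [List.getElem_map, List.getElem_range]
    rw [← List.getD_eq_getElem _ 0 hj2, hb j]
    have hst : start = 1 := by rw [hstart, if_pos hpar]
    simp only [hst, mem_stride]
    have hcond : ((1 : Int) ≤ (j : Int) ∧ j < arr.length ∧ (2 : Int) ∣ (j : Int) - 1)
        ↔ (PySem.Int.mod (j : Int) 2 != 0) = true := by
      rw [bne_iff_ne, ne_eq, h2]; omega
    by_cases hc : (PySem.Int.mod (j : Int) 2 != 0) = true
    · rw [if_pos hc, if_pos (hcond.mpr hc)]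
    · rw [if_neg hc, if_neg (fun h => hc (hcond.mp h))]
  · simp only [hpar, if_neg, Bool.not_eq_true]
    rw [aFold_eq_map arr n (fun i => PySem.Int.mod i 2 == 0)]
    apply List.ext_getElem (by simp [hblen])
    intro j hj1 hj2
    simp only [List.length_map, List.length_range] at hj1
    rw [List.getElem_map, List.getElem_range]
    rw [← List.getD_eq_getElem _ 0 hj2, hb j]
    have hst : start = 0 := by rw [hstart, if_neg (by simpa using hpar)]
    simp only [hst, mem_stride]
    have hcond : ((0 : Int) ≤ (j : Int) ∧ j < arr.length ∧ (2 : Int) ∣ (j : Int) - 0)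
        ↔ (PySem.Int.mod (j : Int) 2 == 0) = true := by
      rw [beq_iff_eq, h2]; omega
    by_cases hc : (PySem.Int.mod (j : Int) 2 == 0) = true
    · rw [if_pos hc, if_pos (hcond.mpr hc)]
    · rw [if_neg hc, if_neg (fun h => hc (hcond.mp h))]
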